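-- pv_equiv track=rewrite | github.com/VirgileCartier/text-generator | text_generator.py | add_beginning_end
-- ===== SOURCE A (Python) =====
-- def add_beginning_end(corpus, n): # rajoute des $ à la fin des phrases - utile pour marquer le début d'un texte et ainsi toujours avoir un contexte assurant le fonctionnement du générateur
--     dollars = ""
--     for i in range(n-1):
--         dollars = dollars + " $ "
--     corpus = dollars + corpus
--     sentence_end = ['.', '!', '?']
--     for i in sentence_end:
--         corpus = corpus.replace(i,dollars)
--     corpus = corpus + dollars
--     return corpus
-- ===== SOURCE B (Python) =====
-- def add_beginning_end(corpus, n):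
--     dollars = " $ " * (n - 1)
--     text = dollars + corpus
--     return "".join(dollars if c in ".!?" else c for c in text) + dollars
-- ===== Notes on version B (the rewrite author's own statement) =====
-- stated objective: idiomatic
-- what changed: Builds the separator by string multiplication instead of an accumulation loop and maps every sentence-end character to it in a single join pass over the text instead of three sequential full-string replace scans.
import Mathlib
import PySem

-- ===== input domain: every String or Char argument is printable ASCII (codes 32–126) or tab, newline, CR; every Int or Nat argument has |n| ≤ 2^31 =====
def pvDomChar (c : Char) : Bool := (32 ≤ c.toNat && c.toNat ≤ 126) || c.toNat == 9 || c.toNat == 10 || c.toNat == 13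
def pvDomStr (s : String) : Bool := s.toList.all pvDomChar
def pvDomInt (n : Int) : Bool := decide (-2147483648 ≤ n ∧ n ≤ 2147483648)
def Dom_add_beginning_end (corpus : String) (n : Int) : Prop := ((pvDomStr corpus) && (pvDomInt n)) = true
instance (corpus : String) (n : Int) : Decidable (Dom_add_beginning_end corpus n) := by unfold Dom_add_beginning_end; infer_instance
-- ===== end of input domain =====

-- B builds the separator by repetition instead of a loop and replaces the three
-- sentence-end characters in ONE pass over the text instead of three replace scans.

-- ===== PORT A =====
def add_beginning_end (corpus : String) (n : Int) : String :=
  let dollars := (PySem.List.pyRange 0 (n-1) 1).foldl (fun acc _ => acc ++ " $ ") ""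
  let corpus1 := dollars ++ corpus
  let sentence_end : List String := [".", "!", "?"]
  let corpus2 := sentence_end.foldl (fun s i => PySem.Str.replace s i dollars) corpus1
  corpus2 ++ dollars

-- ===== PORT B =====
def add_beginning_end_alt (corpus : String) (n : Int) : String :=
  let dollars := String.ofList (PySem.List.pyRepeat " $ ".toList (n-1))
  let text := dollars ++ corpus
  String.ofList (text.toList.flatMap
    (fun c => if c ∈ ['.', '!', '?'] then dollars.toList else [c])) ++ dollars

-- ===== PRECONDITION & SPEC =====
def Spec_add_beginning_end (corpus : String) (n : Int) (out : String) : Prop := out = add_beginning_end_alt corpus n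
instance (corpus : String) (n : Int) (out : String) : Decidable (Spec_add_beginning_end corpus n out) := by unfold Spec_add_beginning_end; infer_instance

-- ===== CLAIM (what is proved, stated in full; the proofs are below) =====
def Claim_equal_add_beginning_end : Prop := ∀ (corpus : String) (n : Int), Dom_add_beginning_end corpus n → Spec_add_beginning_end corpus n (add_beginning_end corpus n)

-- ===== LEMMAS AND PROOFS =====

-- the single-character replacement in one Python .replace scan, as a flatMap
def pvRepl (d : Char) (new : List Char) (c : Char) : List Char :=
  if c = d then new else [c]

theorem pvReplaceGo (d : Char) (new : List Char) :
    ∀ (fuel : Nat) (l acc : List Char), l.length ≤ fuel →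
      PySem.Chars.replace.go [d] new fuel l acc
        = acc.reverse ++ l.flatMap (pvRepl d new) := by
  intro fuel
  induction fuel with
  | zero =>
    intro l acc h
    have : l = [] := List.length_eq_zero_iff.mp (Nat.le_zero.mp h)
    subst this
    simp [PySem.Chars.replace.go]
  | succ k ih =>
    intro l acc h
    cases l with
    | nil => simp [PySem.Chars.replace.go]
    | cons c t =>
      simp only [PySem.Chars.replace.go]
      by_cases hc : c = d
      · subst hc
        have hp : List.isPrefixOf [c] (c :: t) = true := by
          simp [List.isPrefixOf]
        simp only [hp, if_pos]
        rw [ih _ _ (by simpa using Nat.le_of_succ_le_succ h)]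
        simp [pvRepl, List.flatMap_cons]
      · have hp : List.isPrefixOf [d] (c :: t) = false := by
          simp [List.isPrefixOf, Ne.symm hc]
        simp only [hp]
        rw [if_neg (by simp), ih _ _ (by simpa using Nat.le_of_succ_le_succ h)]
        simp [pvRepl, hc, List.flatMap_cons]

theorem pvReplaceSingle (s : List Char) (d : Char) (new : List Char) :
    PySem.Chars.replace s [d] new = s.flatMap (pvRepl d new) := by
  rw [PySem.Chars.replace]
  rw [if_neg (by simp)]
  simpa using pvReplaceGo d new s.length s [] le_rfl

theorem pvReplNoop (L : List Char) (d : Char) (new : List Char) (h : d ∉ L) :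
    L.flatMap (pvRepl d new) = L := by
  induction L with
  | nil => simp
  | cons c t ih =>
    have hc : c ≠ d := fun he => h (he ▸ List.mem_cons_self)
    simp [List.flatMap_cons, pvRepl, hc, ih (fun ht => h (List.mem_cons_of_mem _ ht))]

theorem pvMemRepeat {c : Char} {cs : List Char} {k : Int}
    (h : c ∈ PySem.List.pyRepeat cs k) : c ∈ cs := by
  simp only [PySem.List.pyRepeat, List.mem_flatten] at h
  obtain ⟨l, hl, hc⟩ := h
  rwa [(List.eq_of_mem_replicate hl : l = cs)] at hc

theorem pvRangeLen (m : Int) : (PySem.List.pyRange 0 m 1).length = m.toNat := by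
  simp only [PySem.List.pyRange, Int.ediv_one]
  norm_num
  all_goals omega

theorem pvDollarsFold (l : List Int) (a : String) :
    (l.foldl (fun acc _ => acc ++ " $ ") a).toList
      = a.toList ++ (List.replicate l.length (" $ ".toList)).flatten := by
  induction l generalizing a with
  | nil => simp
  | cons x t ih =>
    rw [List.foldl_cons, ih]
    simp [List.replicate_succ]

-- ===== VERDICT (by name: the statement is the Claim_ definition above) =====
theorem add_beginning_end_spec : Claim_equal_add_beginning_end := by
  intro corpus n _
  unfold Spec_add_beginning_end add_beginning_end add_beginning_end_alt
  set D : List Char := PySem.List.pyRepeat " $ ".toList (n-1) with hD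
  have hnot : ∀ d : Char, d ∈ ['.', '!', '?'] → d ∉ D := by
    intro d hd hmem
    have := pvMemRepeat hmem
    fin_cases hd <;> simp_all
  -- the accumulated dollars string of A equals B's repeated string
  have hdollars : ((PySem.List.pyRange 0 (n-1) 1).foldl (fun acc _ => acc ++ " $ ") "").toList = D := by
    rw [pvDollarsFold, pvRangeLen]
    simp [hD, PySem.List.pyRepeat]
  -- compare the two results character-list-wise
  apply String.toList_injective
  simp only [List.foldl_cons, List.foldl_nil, String.toList_append, String.toList_ofList,
    PySem.Str.toList_replace, hdollars]
  rw [show (".".toList = ['.']) from rfl, show ("!".toList = ['!']) from rfl,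
      show ("?".toList = ['?']) from rfl]
  rw [pvReplaceSingle, pvReplaceSingle, pvReplaceSingle, List.flatMap_assoc, List.flatMap_assoc]
  congr 1
  apply List.flatMap_congr
  intro c _
  rw [← List.flatMap_assoc]
  by_cases h1 : c = '.'
  · subst h1
    rw [show pvRepl '.' D '.' = D from by simp [pvRepl]]
    rw [pvReplNoop D '!' D (hnot '!' (by simp)), pvReplNoop D '?' D (hnot '?' (by simp))]
    simp
  · by_cases h2 : c = '!'
    · subst h2
      rw [show pvRepl '.' D '!' = ['!'] from by simp [pvRepl]]
      rw [show (['!'] : List Char).flatMap (pvRepl '!' D) = D from by simp [pvRepl]]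
      rw [pvReplNoop D '?' D (hnot '?' (by simp))]
      simp
    · by_cases h3 : c = '?'
      · subst h3
        rw [show pvRepl '.' D '?' = ['?'] from by simp [pvRepl]]
        rw [show (['?'] : List Char).flatMap (pvRepl '!' D) = ['?'] from by simp [pvRepl]]
        rw [show (['?'] : List Char).flatMap (pvRepl '?' D) = D from by simp [pvRepl]]
        simp
      · simp [pvRepl, h1, h2, h3]
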